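-- pv_equiv track=rewrite | github.com/RooVelazquez/Sentiment-Analysis | app2.py | handle_negation_list
-- ===== SOURCE A (Python) =====
-- def handle_negation_list(text, negation_words):
--     words = text.split()
--     negated = False
--     processed_words = []
--
--     for word in words:
--         if word in negation_words:
--             negated = True
--             processed_words.append(word)
--         elif negated:
--             processed_words.append(word + "_NEG")
--         else:
--             processed_words.append(word)
--
--     return " ".join(processed_words)
-- ===== SOURCE B (Python) =====
-- def handle_negation_list(text, negation_words):
--     words = text.split()
--     for i, w in enumerate(words):
--         if w in negation_words:
--             break
--     else:
--         return " ".join(words)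
--     tail = [w if w in negation_words else w + "_NEG" for w in words[i + 1:]]
--     return " ".join(words[:i + 1] + tail)
-- ===== Notes on version B (the rewrite author's own statement) =====
-- stated objective: alternative
-- what changed: Replaces the sticky-flag single pass by locate-the-first-negation-word, keep the prefix through it verbatim, then map a _NEG-suffixing transform over the tail; no negation word means a direct join.
import Mathlib
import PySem

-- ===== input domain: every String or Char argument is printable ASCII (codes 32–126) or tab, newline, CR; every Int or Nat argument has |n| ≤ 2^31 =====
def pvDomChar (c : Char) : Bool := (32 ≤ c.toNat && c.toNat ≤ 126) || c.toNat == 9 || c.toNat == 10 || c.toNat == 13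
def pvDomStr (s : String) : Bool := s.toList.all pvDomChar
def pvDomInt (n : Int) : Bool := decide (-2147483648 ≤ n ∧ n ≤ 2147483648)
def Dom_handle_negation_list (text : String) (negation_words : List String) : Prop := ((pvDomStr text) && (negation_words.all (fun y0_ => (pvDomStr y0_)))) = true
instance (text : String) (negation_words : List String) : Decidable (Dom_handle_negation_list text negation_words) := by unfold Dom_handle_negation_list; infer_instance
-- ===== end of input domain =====

-- B replaces A's sticky-negated-flag single pass by locating the first negation word,
-- keeping the prefix through it verbatim and mapping a _NEG-suffixing transform over the tail.

-- ===== PORT A =====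
-- one loop iteration of A: state is (negated, processed_words)
def pvStepA (negation_words : List String) (s : Bool × List String) (word : String) : Bool × List String :=
  if negation_words.contains word then (true, s.2 ++ [word])
  else if s.1 then (s.1, s.2 ++ [word ++ "_NEG"])
  else (s.1, s.2 ++ [word])

def handle_negation_list (text : String) (negation_words : List String) : String :=
  let words := PySem.Str.split₀ text
  let r := words.foldl (pvStepA negation_words) (false, [])
  PySem.Str.join " " r.2

-- ===== PORT B =====
def handle_negation_list_alt (text : String) (negation_words : List String) : String :=
  let words := PySem.Str.split₀ text
  match words.findIdx? (fun w => negation_words.contains w) with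
  | none => PySem.Str.join " " words
  | some i =>
      let tail := (words.drop (i + 1)).map
        (fun w => if negation_words.contains w then w else w ++ "_NEG")
      PySem.Str.join " " (words.take (i + 1) ++ tail)

-- ===== PRECONDITION & SPEC =====
def Spec_handle_negation_list (text : String) (negation_words : List String) (out : String) : Prop := out = handle_negation_list_alt text negation_words
instance (text : String) (negation_words : List String) (out : String) : Decidable (Spec_handle_negation_list text negation_words out) := by unfold Spec_handle_negation_list; infer_instance

-- ===== CLAIM (what is proved, stated in full; the proofs are below) =====
def Claim_equal_handle_negation_list : Prop := ∀ (text : String) (negation_words : List String), Dom_handle_negation_list text negation_words → Spec_handle_negation_list text negation_words (handle_negation_list text negation_words)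

-- ===== LEMMAS AND PROOFS =====

-- once the flag is true, A's remaining loop is exactly B's tail transform
lemma foldA_true (nw : List String) (ws acc : List String) :
    (ws.foldl (pvStepA nw) (true, acc)).2
      = acc ++ ws.map (fun w => if nw.contains w then w else w ++ "_NEG") := by
  induction ws generalizing acc with
  | nil => simp
  | cons w ws ih =>
    simp only [List.foldl_cons, List.map_cons, pvStepA]
    by_cases h : w ∈ nw <;> simp only [List.contains_eq_mem, h, decide_true, decide_false,
      Bool.false_eq_true, if_true, if_false, ih] <;> simp

-- A's whole loop from the initial (false, acc) state equals B's find/split/transform result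
lemma foldA_false (nw : List String) (ws acc : List String) :
    (ws.foldl (pvStepA nw) (false, acc)).2
      = acc ++ (match ws.findIdx? (fun w => nw.contains w) with
        | none => ws
        | some i => ws.take (i + 1)
            ++ (ws.drop (i + 1)).map (fun w => if nw.contains w then w else w ++ "_NEG")) := by
  induction ws generalizing acc with
  | nil => simp
  | cons w ws ih =>
    simp only [List.foldl_cons, pvStepA, List.findIdx?_cons]
    by_cases h : w ∈ nw
    · simp only [List.contains_eq_mem, h, decide_true, if_true, foldA_true]
      simp
    · simp only [List.contains_eq_mem, h, decide_false, Bool.false_eq_true, if_false, ih]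
      cases hf : ws.findIdx? (fun w => nw.contains w) with
      | none => simp only [List.contains_eq_mem] at hf; simp [hf]
      | some i =>
        simp only [List.contains_eq_mem] at hf
        simp [hf, List.take_succ_cons, List.drop_succ_cons]

-- ===== VERDICT (by name: the statement is the Claim_ definition above) =====
theorem handle_negation_list_spec : Claim_equal_handle_negation_list := by
  intro text nw _
  unfold Spec_handle_negation_list handle_negation_list handle_negation_list_alt
  dsimp only
  rw [foldA_false nw (PySem.Str.split₀ text) []]
  cases hf : (PySem.Str.split₀ text).findIdx? (fun w => nw.contains w) <;> simp
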